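-- pv_equiv track=rewrite | github.com/YaraAsuity/Secure-Ciphers-GUI | src/row_transposition_cipher.py | row_transposition_decrypt
-- ===== SOURCE A (Python) =====
-- import math
--
-- def row_transposition_decrypt(ciphertext, key):
--             num_columns = len(key)
--             num_rows = math.ceil(len(ciphertext) / num_columns)
--             grid = [['' for _ in range(num_columns)] for _ in range(num_rows)]
--
--             index = 0
--             for k in sorted(key):
--                 col = key.index(k)
--                 for row in range(num_rows):
--                     grid[row][col] = ciphertext[index]
--                     index += 1
--
--             plaintext = ''
--             for row in grid:
--                 plaintext += ''.join(row)
--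
--             return plaintext.strip('X')
-- ===== SOURCE B (Python) =====
-- import math
--
-- def row_transposition_decrypt(ciphertext, key):
--     num_rows = math.ceil(len(ciphertext) / len(key))
--     offset = {}
--     for i, k in enumerate(sorted(key)):
--         offset[key.index(k)] = i * num_rows
--     out = []
--     for row in range(num_rows):
--         for col in range(len(key)):
--             if col in offset:
--                 out.append(ciphertext[offset[col] + row])
--     return ''.join(out).strip('X')
-- ===== Notes on version B (the rewrite author's own statement) =====
-- stated objective: alternative
-- what changed: B drops A's pre-allocated 2D grid (filled column-by-column then flattened) and instead builds a dict mapping each destination column to its source start offset, then emits the plaintext directly in one row-major double loop.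
import Mathlib
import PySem

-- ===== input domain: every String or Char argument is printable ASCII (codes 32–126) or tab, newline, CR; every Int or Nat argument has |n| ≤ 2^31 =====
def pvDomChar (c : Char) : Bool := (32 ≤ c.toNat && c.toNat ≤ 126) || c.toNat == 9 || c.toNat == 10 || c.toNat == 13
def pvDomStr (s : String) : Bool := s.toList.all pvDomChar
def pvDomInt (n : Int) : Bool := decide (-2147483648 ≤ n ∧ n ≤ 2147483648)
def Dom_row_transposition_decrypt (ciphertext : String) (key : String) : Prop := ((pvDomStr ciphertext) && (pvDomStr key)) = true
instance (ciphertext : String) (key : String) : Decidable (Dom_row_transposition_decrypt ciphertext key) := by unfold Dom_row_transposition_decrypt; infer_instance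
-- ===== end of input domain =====

-- B replaces A's pre-allocated 2D grid (filled column-by-column, then flattened) by a
-- dict from destination column to source offset and a single row-major double loop
-- (objective: alternative decomposition, same asymptotic cost).


-- ===== PORT A =====
-- grid cells are Python strings ('' or one char), ported as List Char ([] or [c]).
-- math.ceil(len/cols) is exact Nat ceiling division (a + b - 1) / b here.
-- ciphertext[index] is ported with getD ' ': under Pre_ the index is always in range
-- (outside Pre_ Python raises IndexError); ''.join(row) is concatenation = flatten.
def row_transposition_decrypt (ciphertext : String) (key : String) : String :=
  let ct := ciphertext.toList
  let ks := key.toList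
  let numColumns := ks.length
  let numRows := (ct.length + numColumns - 1) / numColumns
  let grid : List (List (List Char)) := List.replicate numRows (List.replicate numColumns ([] : List Char))
  let st := (PySem.List.sorted ks (fun x => x) false).foldl
    (fun (st : List (List (List Char)) × Nat) k =>
      let col := (PySem.List.index? ks k).getD 0   -- key.index(k); k ∈ ks always, so never the default
      (List.range numRows).foldl
        (fun st2 row => (st2.1.modify row (fun rw => rw.set col [ct.getD st2.2 ' ']), st2.2 + 1)) st)
    (grid, 0)
  let plaintext := st.1.foldl (fun acc rw => acc ++ rw.flatten) []
  String.ofList (PySem.Chars.stripChars plaintext ['X'])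

-- ===== PORT B =====
-- same conventions: getD ' ' for ciphertext[...] (in range under Pre_), ''.join = the list itself.
def row_transposition_decrypt_alt (ciphertext : String) (key : String) : String :=
  let ct := ciphertext.toList
  let ks := key.toList
  let numRows := (ct.length + ks.length - 1) / ks.length
  let offset : PySem.Dict Nat Nat :=
    (PySem.List.enumerate (PySem.List.sorted ks (fun x => x) false) 0).foldl
      (fun d ik => d.insert ((PySem.List.index? ks ik.2).getD 0) (ik.1.toNat * numRows))
      PySem.Dict.empty
  let out := (List.range numRows).foldl (fun acc row =>
      (List.range ks.length).foldl (fun acc2 col =>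
        match offset.get? col with
        | some off => acc2 ++ [ct.getD (off + row) ' ']
        | none => acc2) acc) []
  String.ofList (PySem.Chars.stripChars out ['X'])

-- ===== PRECONDITION & SPEC =====
-- Pre_ excludes exactly the inputs where Python A raises: an empty key (ZeroDivisionError in
-- math.ceil) and a ciphertext whose length is not a multiple of len(key) (IndexError).
def Pre_row_transposition_decrypt (ciphertext : String) (key : String) : Prop :=
  key.toList ≠ [] ∧ ciphertext.toList.length % key.toList.length = 0
instance (ciphertext : String) (key : String) : Decidable (Pre_row_transposition_decrypt ciphertext key) := by unfold Pre_row_transposition_decrypt; infer_instance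
def pvWitness_row_transposition_decrypt : String × String := ("ba", "ab")
def Spec_row_transposition_decrypt (ciphertext : String) (key : String) (out : String) : Prop := out = row_transposition_decrypt_alt ciphertext key
instance (ciphertext : String) (key : String) (out : String) : Decidable (Spec_row_transposition_decrypt ciphertext key out) := by unfold Spec_row_transposition_decrypt; infer_instance

-- ===== CLAIM (what is proved, stated in full; the proofs are below) =====
def Claim_equal_row_transposition_decrypt : Prop := ∀ (ciphertext : String) (key : String), Dom_row_transposition_decrypt ciphertext key → Pre_row_transposition_decrypt ciphertext key → Spec_row_transposition_decrypt ciphertext key (row_transposition_decrypt ciphertext key)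

-- ===== LEMMAS AND PROOFS =====

-- the value a finished offset-dict d assigns to cell (r, c)
def pvCell (ct : List Char) (d : PySem.Dict Nat Nat) (r c : Nat) : List Char :=
  match d.get? c with
  | some off => [ct.getD (off + r) ' ']
  | none => []

-- a grid whose cell (r, c) holds h r c
def pvGrid (n cols : Nat) (h : Nat → Nat → List Char) : List (List (List Char)) :=
  (List.range n).map (fun r => (List.range cols).map (h r))

lemma pvGrid_congr {n cols : Nat} {h h' : Nat → Nat → List Char}
    (He : ∀ r, r < n → ∀ c, c < cols → h r c = h' r c) : pvGrid n cols h = pvGrid n cols h' := by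
  unfold pvGrid
  refine List.map_congr_left (fun r hr => ?_)
  exact List.map_congr_left (fun c hc => He r (List.mem_range.mp hr) c (List.mem_range.mp hc))

lemma pvSet_map_range {cols c0 : Nat} (f : Nat → List Char) (v : List Char) :
    ((List.range cols).map f).set c0 v = (List.range cols).map (fun c => if c = c0 then v else f c) := by
  apply List.ext_getElem
  · simp
  · intro i h1 h2
    simp only [List.getElem_set, List.getElem_map, List.getElem_range]
    rcases eq_or_ne i c0 with h | h
    · simp [h]
    · simp [h, Ne.symm h]

lemma pvModify_map_range {n m : Nat} (f : Nat → List (List Char)) (g : List (List Char) → List (List Char)) :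
    ((List.range n).map f).modify m g = (List.range n).map (fun r => if r = m then g (f r) else f r) := by
  apply List.ext_getElem
  · simp
  · intro i h1 h2
    simp only [List.getElem_modify, List.getElem_map, List.getElem_range]
    rcases eq_or_ne i m with h | h
    · simp [h]
    · simp [h, Ne.symm h]

-- the inner 'for row in range(num_rows)' loop fills column col and advances the index
lemma pvInner (ct : List Char) (n cols col : Nat) :
    ∀ (m : Nat) (h : Nat → Nat → List Char) (s : Nat),
    (List.range m).foldl
        (fun st2 row => (st2.1.modify row (fun rw => rw.set col [ct.getD st2.2 ' ']), st2.2 + 1))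
        (pvGrid n cols h, s)
      = (pvGrid n cols (fun r c => if c = col ∧ r < m then [ct.getD (s + r) ' '] else h r c), s + m) := by
  intro m
  induction m with
  | zero =>
    intro h s
    simp only [List.range_zero, List.foldl_nil, Nat.add_zero]
    congr 1
    exact pvGrid_congr (fun r _ c _ => by simp)
  | succ m ih =>
    intro h s
    rw [List.range_succ, List.foldl_append, ih h s]
    simp only [List.foldl_cons, List.foldl_nil]
    rw [Prod.mk.injEq]
    refine ⟨?_, by omega⟩
    show (pvGrid n cols _).modify m _ = _
    unfold pvGrid
    rw [pvModify_map_range]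
    apply List.map_congr_left
    intro r hr
    rcases eq_or_ne r m with hrm | hrm
    · subst hrm
      rw [if_pos rfl, pvSet_map_range]
      apply List.map_congr_left
      intro c hc
      rcases eq_or_ne c col with hcc | hcc
      · simp [hcc]
      · simp [hcc]
    · simp only [if_neg hrm]
      apply List.map_congr_left
      intro c hc
      by_cases hlt : r < m
      · simp [hlt, show r < m + 1 by omega]
      · simp [hlt, show ¬ r < m + 1 by omega]

-- the outer loop over sorted(key), with B's offset dict as ghost state:
-- after processing s' starting at position i, the grid is exactly the grid the dict describes
lemma pvOuter (ct ks : List Char) (n : Nat) :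
    ∀ (s' : List Char) (d : PySem.Dict Nat Nat) (i : Nat),
    s'.foldl
        (fun (st : List (List (List Char)) × Nat) k =>
          let col := (PySem.List.index? ks k).getD 0
          (List.range n).foldl
            (fun st2 row => (st2.1.modify row (fun rw => rw.set col [ct.getD st2.2 ' ']), st2.2 + 1)) st)
        (pvGrid n ks.length (pvCell ct d), i * n)
      = (pvGrid n ks.length (pvCell ct
            ((PySem.List.enumerate s' (i : Int)).foldl
              (fun d ik => d.insert ((PySem.List.index? ks ik.2).getD 0) (ik.1.toNat * n)) d)),
         (i + s'.length) * n) := by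
  intro s'
  induction s' with
  | nil => intro d i; simp [PySem.List.enumerate_nil]
  | cons k t ih =>
    intro d i
    rw [List.foldl_cons]
    simp only []
    rw [pvInner]
    have hgrid : pvGrid n ks.length
        (fun r c => if c = (PySem.List.index? ks k).getD 0 ∧ r < n then [ct.getD (i * n + r) ' '] else pvCell ct d r c)
        = pvGrid n ks.length (pvCell ct (d.insert ((PySem.List.index? ks k).getD 0) (i * n))) := by
      apply pvGrid_congr
      intro r hr c _
      rcases eq_or_ne c ((PySem.List.index? ks k).getD 0) with hc | hc
      · simp [hc, hr, pvCell]
      · simp only [PySem.List.index?_eq_idxOf?] at hc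
        simp [pvCell, PySem.Dict.get?_insert, hc]
    rw [hgrid, show i * n + n = (i + 1) * n by ring, ih]
    rw [PySem.List.enumerate_cons]
    simp only [List.foldl_cons, Int.toNat_natCast]
    rw [show ((i : Int) + 1) = ((i + 1 : Nat) : Int) by push_cast; ring]
    rw [Prod.mk.injEq]
    exact ⟨rfl, by rw [List.length_cons, show i + 1 + t.length = i + (t.length + 1) from by omega]⟩

-- the main equality
lemma pvMain (ciphertext key : String) :
    row_transposition_decrypt ciphertext key = row_transposition_decrypt_alt ciphertext key := by
  unfold row_transposition_decrypt row_transposition_decrypt_alt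
  simp only []
  set ct := ciphertext.toList
  set ks := key.toList
  set n := (ct.length + ks.length - 1) / ks.length with hn
  set D := (PySem.List.enumerate (PySem.List.sorted ks (fun x => x) false) 0).foldl
      (fun d ik => d.insert ((PySem.List.index? ks ik.2).getD 0) (ik.1.toNat * n))
      PySem.Dict.empty with hD
  have hempty : ∀ r c : Nat, pvCell ct PySem.Dict.empty r c = [] := by
    intro r c; simp [pvCell, PySem.Dict.get?_empty]
  have hinit : List.replicate n (List.replicate ks.length ([] : List Char))
      = pvGrid n ks.length (pvCell ct PySem.Dict.empty) := by
    unfold pvGrid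
    apply List.ext_getElem
    · simp
    · intro i h1 h2
      simp only [List.getElem_replicate, List.getElem_map, List.getElem_range]
      apply List.ext_getElem
      · simp
      · intro j g1 g2
        simp [hempty]
  rw [hinit]
  have houter := pvOuter ct ks n (PySem.List.sorted ks (fun x => x) false) PySem.Dict.empty 0
  simp only [Nat.zero_mul, Nat.cast_zero] at houter
  rw [houter]
  congr 1
  -- A's flattening of the grid = B's row-major double loop, both as a double flatMap
  have hA : (pvGrid n ks.length (pvCell ct D)).foldl (fun acc rw => acc ++ rw.flatten) ([] : List Char)
      = (List.range n).flatMap (fun r => (List.range ks.length).flatMap (pvCell ct D r)) := by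
    rw [PySem.List.foldl_append_eq_flatMap]
    unfold pvGrid
    rw [List.nil_append, List.flatMap_map]
    simp [List.flatMap_def]
  have hstep : ∀ (acc : List Char) (row : Nat),
      (List.range ks.length).foldl (fun acc2 col =>
        match D.get? col with
        | some off => acc2 ++ [ct.getD (off + row) ' ']
        | none => acc2) acc
      = acc ++ (List.range ks.length).flatMap (pvCell ct D row) := by
    intro acc row
    have hmatch : ∀ (acc2 : List Char) (col : Nat),
        (match D.get? col with
         | some off => acc2 ++ [ct.getD (off + row) ' ']
         | none => acc2) = acc2 ++ pvCell ct D row col := by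
      intro acc2 col; cases h : D.get? col <;> simp [pvCell, h]
    simp only [hmatch]
    rw [PySem.List.foldl_append_eq_flatMap]
  have hB : (List.range n).foldl (fun acc row =>
        (List.range ks.length).foldl (fun acc2 col =>
          match D.get? col with
          | some off => acc2 ++ [ct.getD (off + row) ' ']
          | none => acc2) acc) ([] : List Char)
      = (List.range n).flatMap (fun r => (List.range ks.length).flatMap (pvCell ct D r)) := by
    have hcong : (List.range n).foldl (fun acc row =>
        (List.range ks.length).foldl (fun acc2 col =>
          match D.get? col with
          | some off => acc2 ++ [ct.getD (off + row) ' ']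
          | none => acc2) acc) ([] : List Char)
        = (List.range n).foldl (fun acc row => acc ++ (List.range ks.length).flatMap (pvCell ct D row)) [] :=
      PySem.List.foldl_congr_mem _ _ _ _ (fun acc x _ => hstep acc x)
    rw [hcong, PySem.List.foldl_append_eq_flatMap, List.nil_append]
  rw [hA, ← hB]

-- ===== VERDICT (by name: the statement is the Claim_ definition above) =====
theorem row_transposition_decrypt_spec : Claim_equal_row_transposition_decrypt := by
  intro ciphertext key _hdom _hpre
  unfold Spec_row_transposition_decrypt
  exact pvMain ciphertext key
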